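-- pv_equiv track=rewrite | github.com/Exahilosys/survey | survey/_helpers.py | text_index_to_point
-- ===== SOURCE A (Python) =====
-- def text_index_to_point(lines, ci):
--
--     cy = 0
--     cx = ci
--     for sx in map(len, lines):
--         sx += 1
--         ci -= sx
--         if ci < 0:
--             break
--         cy += 1
--         cx = ci
--
--     return (cy, cx)
-- ===== SOURCE B (Python) =====
-- def text_index_to_point(lines, ci):
--     # build cumulative end-offsets of the lines, then binary-search for the row
--     cums = []
--     t = 0
--     for line in lines:
--         t += len(line) + 1
--         cums.append(t)
--     lo, hi = 0, len(cums)
--     while lo < hi: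
--         mid = (lo + hi) // 2
--         if ci < cums[mid]:
--             hi = mid
--         else:
--             lo = mid + 1
--     cx = ci - cums[lo - 1] if lo else ci
--     return (lo, cx)
-- ===== Notes on version B (the rewrite author's own statement) =====
-- stated objective: alternative
-- what changed: Replaces the single subtracting scan with a prefix-sum table of cumulative line end-offsets followed by a hand-written binary search (bisect_right) for the row, with the column recovered from the table.
import Mathlib
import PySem

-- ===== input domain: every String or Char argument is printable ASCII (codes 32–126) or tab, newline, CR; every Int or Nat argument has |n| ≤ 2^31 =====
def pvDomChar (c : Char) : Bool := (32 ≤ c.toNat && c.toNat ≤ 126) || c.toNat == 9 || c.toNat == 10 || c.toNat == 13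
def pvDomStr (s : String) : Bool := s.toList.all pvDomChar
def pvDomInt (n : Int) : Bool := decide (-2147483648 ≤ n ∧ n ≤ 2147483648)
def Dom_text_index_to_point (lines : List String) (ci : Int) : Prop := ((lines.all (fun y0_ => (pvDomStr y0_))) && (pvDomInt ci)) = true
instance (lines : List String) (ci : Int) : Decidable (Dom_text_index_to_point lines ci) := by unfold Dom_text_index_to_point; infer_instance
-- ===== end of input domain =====

-- B replaces A's single subtracting scan by a prefix-sum table of line end-offsets
-- plus a hand-written binary search (bisect_right) for the row: an alternative decomposition.


-- ===== PORT A =====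
-- A's for-loop with break, step for step: state (cy, cx, ci).
def tiLoopA (ls : List String) (cy cx ci : Int) : Int × Int :=
  match ls with
  | [] => (cy, cx)
  | s :: rest =>
    let ci' := ci - ((PySem.Str.len s : Int) + 1)   -- sx = len(s); sx += 1; ci -= sx
    if ci' < 0 then (cy, cx)                        -- break
    else tiLoopA rest (cy + 1) ci' ci'              -- cy += 1; cx = ci

def text_index_to_point (lines : List String) (ci : Int) : Int × Int :=
  tiLoopA lines 0 ci ci

-- ===== PORT B =====
-- cums built by the same append loop as Source B (state: list built so far, running total t).
def tiCums (lines : List String) : List Int :=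
  (lines.foldl (fun (acc : List Int × Int) s =>
      let t := acc.2 + (PySem.Str.len s : Int) + 1
      (acc.1 ++ [t], t)) ([], 0)).1

-- hand-written bisect_right of Source B; cums[mid] is exact as getD since 0 ≤ lo ≤ mid < hi ≤ len
-- throughout, and (lo+hi)//2 on naturals is Nat division.
def tiBisect (a : List Int) (x : Int) (lo hi : Nat) : Nat :=
  if _h : lo < hi then
    let mid := (lo + hi) / 2
    if x < a.getD mid 0 then tiBisect a x lo mid
    else tiBisect a x (mid + 1) hi
  else lo
termination_by hi - lo
decreasing_by all_goals omega

def text_index_to_point_alt (lines : List String) (ci : Int) : Int × Int :=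
  let cums := tiCums lines
  let lo := tiBisect cums ci 0 cums.length
  let cx := if lo = 0 then ci else ci - cums.getD (lo - 1) 0   -- cums[lo-1]: exact, 0 < lo ≤ len
  ((lo : Int), cx)

-- ===== PRECONDITION & SPEC =====
def Spec_text_index_to_point (lines : List String) (ci : Int) (out : Int × Int) : Prop := out = text_index_to_point_alt lines ci
instance (lines : List String) (ci : Int) (out : Int × Int) : Decidable (Spec_text_index_to_point lines ci out) := by unfold Spec_text_index_to_point; infer_instance

-- ===== CLAIM (what is proved, stated in full; the proofs are below) =====
def Claim_equal_text_index_to_point : Prop := ∀ (lines : List String) (ci : Int), Dom_text_index_to_point lines ci → Spec_text_index_to_point lines ci (text_index_to_point lines ci)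

-- ===== LEMMAS AND PROOFS =====

-- Reference shapes: cumulative offsets starting at t, the break index, the final column.
def tiCumsR (ls : List String) (t : Int) : List Int :=
  match ls with
  | [] => []
  | s :: rest => (t + (PySem.Str.len s : Int) + 1) :: tiCumsR rest (t + (PySem.Str.len s : Int) + 1)

def tiBnd (ls : List String) (r : Int) : Nat :=
  match ls with
  | [] => 0
  | s :: rest =>
    if r - ((PySem.Str.len s : Int) + 1) < 0 then 0
    else tiBnd rest (r - ((PySem.Str.len s : Int) + 1)) + 1

def tiCx (ls : List String) (r : Int) : Int :=
  match ls with
  | [] => r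
  | s :: rest =>
    if r - ((PySem.Str.len s : Int) + 1) < 0 then r
    else tiCx rest (r - ((PySem.Str.len s : Int) + 1))

theorem tiLoopA_cons (s : String) (rest : List String) (cy cx ci : Int) :
    tiLoopA (s :: rest) cy cx ci =
      if ci - ((PySem.Str.len s : Int) + 1) < 0 then (cy, cx)
      else tiLoopA rest (cy + 1) (ci - ((PySem.Str.len s : Int) + 1)) (ci - ((PySem.Str.len s : Int) + 1)) := rfl

theorem tiCums_eq_r (ls : List String) (acc : List Int) (t : Int) :
    (ls.foldl (fun (acc : List Int × Int) s =>
      let u := acc.2 + (PySem.Str.len s : Int) + 1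
      (acc.1 ++ [u], u)) (acc, t)).1 = acc ++ tiCumsR ls t := by
  induction ls generalizing acc t with
  | nil => simp [tiCumsR]
  | cons s rest ih =>
    rw [List.foldl_cons]
    show (rest.foldl _ (acc ++ [t + (PySem.Str.len s : Int) + 1], t + (PySem.Str.len s : Int) + 1)).1 = _
    rw [ih, tiCumsR, List.append_assoc]
    rfl

theorem tiCumsR_length (ls : List String) (t : Int) : (tiCumsR ls t).length = ls.length := by
  induction ls generalizing t with
  | nil => rfl
  | cons s rest ih => unfold tiCumsR; simp only [List.length_cons, ih]

theorem tiBnd_le (ls : List String) (r : Int) : tiBnd ls r ≤ ls.length := by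
  induction ls generalizing r with
  | nil => simp [tiBnd]
  | cons s rest ih =>
    unfold tiBnd
    split
    · simp
    · have := ih (r - ((PySem.Str.len s : Int) + 1)); simp only [List.length_cons]; omega

theorem tiCumsR_gt (ls : List String) (t : Int) :
    ∀ j, j < ls.length → t < (tiCumsR ls t).getD j 0 := by
  induction ls generalizing t with
  | nil => intro j hj; simp at hj
  | cons s rest ih =>
    intro j hj
    unfold tiCumsR
    match j with
    | 0 =>
      have : (0:Int) ≤ (PySem.Str.len s : Int) := Int.natCast_nonneg _
      rw [List.getD_cons_zero]; omega
    | Nat.succ k =>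
      have h := ih (t + (PySem.Str.len s : Int) + 1) k (by simpa using hj)
      have : (0:Int) ≤ (PySem.Str.len s : Int) := Int.natCast_nonneg _
      rw [List.getD_cons_succ]; omega

theorem tiBnd_lower (ls : List String) (t ci : Int) :
    ∀ i, i < tiBnd ls (ci - t) → (tiCumsR ls t).getD i 0 ≤ ci := by
  induction ls generalizing t with
  | nil => intro i hi; simp [tiBnd] at hi
  | cons s rest ih =>
    intro i hi
    unfold tiBnd at hi
    unfold tiCumsR
    by_cases hb : ci - t - ((PySem.Str.len s : Int) + 1) < 0
    · rw [if_pos hb] at hi; omega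
    · rw [if_neg hb] at hi
      have heq : ci - t - ((PySem.Str.len s : Int) + 1) = ci - (t + (PySem.Str.len s : Int) + 1) := by ring
      match i with
      | 0 => rw [List.getD_cons_zero]; omega
      | Nat.succ k =>
        have := ih (t + (PySem.Str.len s : Int) + 1) k (by rw [← heq]; omega)
        rw [List.getD_cons_succ]; exact this

theorem tiBnd_upper (ls : List String) (t ci : Int) :
    ∀ i, tiBnd ls (ci - t) ≤ i → i < ls.length → ci < (tiCumsR ls t).getD i 0 := by
  induction ls generalizing t with
  | nil => intro i _ hi; simp at hi
  | cons s rest ih =>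
    intro i hbi hi
    unfold tiBnd at hbi
    unfold tiCumsR
    by_cases hb : ci - t - ((PySem.Str.len s : Int) + 1) < 0
    · -- break at the head: ci < t' and every later entry is > t'
      match i with
      | 0 => rw [List.getD_cons_zero]; omega
      | Nat.succ k =>
        have h := tiCumsR_gt rest (t + (PySem.Str.len s : Int) + 1) k (by simpa using hi)
        rw [List.getD_cons_succ]; omega
    · rw [if_neg hb] at hbi
      have heq : ci - t - ((PySem.Str.len s : Int) + 1) = ci - (t + (PySem.Str.len s : Int) + 1) := by ring
      match i with
      | 0 => omega
      | Nat.succ k =>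
        have := ih (t + (PySem.Str.len s : Int) + 1) k (by rw [heq] at hbi; omega) (by simpa using hi)
        rw [List.getD_cons_succ]; exact this

-- the binary search returns any boundary satisfying the two-sided characterisation
theorem tiBisect_eq (a : List Int) (x : Int) (b : Nat)
    (hb1 : ∀ i, i < b → a.getD i 0 ≤ x)
    (hb2 : ∀ i, b ≤ i → i < a.length → x < a.getD i 0) :
    ∀ lo hi, lo ≤ b → b ≤ hi → hi ≤ a.length → tiBisect a x lo hi = b := by
  intro lo hi
  induction hlh : hi - lo using Nat.strong_induction_on generalizing lo hi with
  | _ n ih =>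
    intro hlob hbhi hhi
    rw [tiBisect]
    by_cases h : lo < hi
    · simp only [dif_pos h]
      set mid := (lo + hi) / 2 with hmid
      have hm1 : lo ≤ mid := by omega
      have hm2 : mid < hi := by omega
      by_cases hx : x < a.getD mid 0
      · simp only [if_pos hx]
        have hbm : b ≤ mid := by
          by_contra hc
          exact absurd (hb1 mid (by omega)) (by omega)
        exact ih (mid - lo) (by omega) lo mid rfl hlob hbm (by omega)
      · simp only [if_neg hx]
        have hbm : mid < b := by
          by_contra hc
          exact absurd (hb2 mid (by omega) (by omega)) (by omega)
        exact ih (hi - (mid + 1)) (by omega) (mid + 1) hi rfl (by omega) hbhi hhi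
    · simp only [dif_neg h]; omega

theorem tiLoopA_eq (ls : List String) (cy r : Int) :
    tiLoopA ls cy r r = (cy + (tiBnd ls r : Int), tiCx ls r) := by
  induction ls generalizing cy r with
  | nil => simp [tiLoopA, tiBnd, tiCx]
  | cons s rest ih =>
    rw [tiLoopA_cons]
    unfold tiBnd tiCx
    by_cases hb : r - ((PySem.Str.len s : Int) + 1) < 0
    · rw [if_pos hb, if_pos hb, if_pos hb]; simp
    · rw [if_neg hb, if_neg hb, if_neg hb, ih]
      simp only [Prod.mk.injEq]
      refine ⟨by push_cast; ring, trivial⟩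

theorem tiCx_eq (ls : List String) (t ci : Int) :
    tiCx ls (ci - t) =
      if tiBnd ls (ci - t) = 0 then ci - t
      else ci - (tiCumsR ls t).getD (tiBnd ls (ci - t) - 1) 0 := by
  induction ls generalizing t with
  | nil => simp [tiCx, tiBnd]
  | cons s rest ih =>
    unfold tiCx tiBnd tiCumsR
    by_cases hb : ci - t - ((PySem.Str.len s : Int) + 1) < 0
    · rw [if_pos hb, if_pos hb, if_pos rfl]
    · rw [if_neg hb, if_neg hb]
      have heq : ci - t - ((PySem.Str.len s : Int) + 1) = ci - (t + (PySem.Str.len s : Int) + 1) := by ring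
      rw [heq, ih (t + (PySem.Str.len s : Int) + 1)]
      by_cases hz : tiBnd rest (ci - (t + (PySem.Str.len s : Int) + 1)) = 0
      · rw [if_pos hz, if_neg (by omega), hz]
        rw [List.getD_cons_zero]
      · rw [if_neg hz, if_neg (by omega)]
        rcases Nat.exists_eq_succ_of_ne_zero hz with ⟨k, hk⟩
        rw [hk]
        simp only [Nat.succ_sub_one, List.getD_cons_succ]

-- ===== VERDICT (by name: the statement is the Claim_ definition above) =====
theorem text_index_to_point_spec : Claim_equal_text_index_to_point := by
  intro lines ci _
  unfold Spec_text_index_to_point text_index_to_point text_index_to_point_alt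
  have hc : tiCums lines = tiCumsR lines 0 := by
    simpa using tiCums_eq_r lines [] 0
  have hb : tiBisect (tiCums lines) ci 0 (tiCums lines).length = tiBnd lines ci := by
    rw [hc, tiCumsR_length]
    have h0 : ci - 0 = ci := by ring
    apply tiBisect_eq
    · intro i hi
      exact tiBnd_lower lines 0 ci i (by rw [h0]; exact hi)
    · intro i h1 h2
      exact tiBnd_upper lines 0 ci i (by rw [h0]; exact h1) (by rwa [tiCumsR_length] at h2)
    · exact Nat.zero_le _
    · exact tiBnd_le lines ci
    · rw [tiCumsR_length]
  show tiLoopA lines 0 ci ci =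
      ((tiBisect (tiCums lines) ci 0 (tiCums lines).length : Int),
        if tiBisect (tiCums lines) ci 0 (tiCums lines).length = 0 then ci
        else ci - (tiCums lines).getD (tiBisect (tiCums lines) ci 0 (tiCums lines).length - 1) 0)
  rw [tiLoopA_eq, hb, hc]
  have hx := tiCx_eq lines 0 ci
  simp only [sub_zero] at hx
  rw [hx]
  simp
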